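-- pv_equiv track=rewrite | github.com/paritoshtripathi935/Venom | Programming/disk.py | disk_stack
-- ===== SOURCE A (Python) =====
-- def disk_stack(disk_list):
--     stack_list = []
--     for disk in disk_list:
--         for stack in stack_list:
--             if disk < stack[-1]: # if disk is smaller than the top of the stack
--                 stack.append(disk) # append the disk to the stack
--                 break
--         else:
--             stack_list.append([disk])
--     return stack_list
-- ===== SOURCE B (Python) =====
-- def disk_stack(disk_list):
--     # Patience-style stacking: tops[] mirrors the top disk of each stack and is
--     # always non-decreasing, so a binary search finds the leftmost stack whose
--     # top is greater than the disk in O(log k) instead of a linear scan.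
--     stacks = []
--     tops = []
--     for d in disk_list:
--         lo, hi = 0, len(tops)
--         while lo < hi:
--             mid = (lo + hi) // 2
--             if tops[mid] <= d:
--                 lo = mid + 1
--             else:
--                 hi = mid
--         if lo == len(stacks):
--             stacks.append([d])
--             tops.append(d)
--         else:
--             stacks[lo].append(d)
--             tops[lo] = d
--     return stacks
-- ===== Notes on version B (the rewrite author's own statement) =====
-- stated objective: faster
-- what changed: Replaces the linear scan over all stacks per disk with a maintained non-decreasing array of stack tops and a binary search for the leftmost top greater than the disk.
import Mathlib
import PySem

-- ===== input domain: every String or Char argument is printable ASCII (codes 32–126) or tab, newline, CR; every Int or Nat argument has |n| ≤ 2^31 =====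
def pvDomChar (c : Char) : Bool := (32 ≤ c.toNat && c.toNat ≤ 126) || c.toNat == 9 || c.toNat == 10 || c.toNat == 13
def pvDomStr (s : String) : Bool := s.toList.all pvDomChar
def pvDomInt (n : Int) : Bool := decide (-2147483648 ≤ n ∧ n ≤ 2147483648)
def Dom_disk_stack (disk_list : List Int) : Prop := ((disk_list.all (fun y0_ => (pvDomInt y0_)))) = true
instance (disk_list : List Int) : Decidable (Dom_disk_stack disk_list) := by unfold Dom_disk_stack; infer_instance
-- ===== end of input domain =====

-- B replaces A's linear scan over the sks by a binary search on the (always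
-- non-decreasing) list of stack tops: O(n log n) instead of O(n^2).

-- ===== PORT A =====
-- stack[-1]: every stack is created as [disk] and only grows, so it is never empty and
-- PySem.List.pyGet? … (-1) is always `some`; `.getD 0` merely discharges the Option.
def diskTopA (s : List Int) : Int := (PySem.List.pyGet? s (-1)).getD 0

-- the inner `for stack in stack_list: … break / else: append`
def diskPlaceA (d : Int) : List (List Int) → List (List Int)
  | [] => [[d]]
  | s :: rest => if d < diskTopA s then (s ++ [d]) :: rest else s :: diskPlaceA d rest

def disk_stack (disk_list : List Int) : List (List Int) :=
  disk_list.foldl (fun acc d => diskPlaceA d acc) []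

-- ===== PORT B =====
-- the `while lo < hi` binary-search loop of Source B (tops[mid] is always in range, so getD is exact)
def diskSearchB (tops : List Int) (d : Int) (lo hi : Nat) : Nat :=
  if h : lo < hi then
    if tops.getD ((lo + hi) / 2) 0 ≤ d then diskSearchB tops d ((lo + hi) / 2 + 1) hi
    else diskSearchB tops d lo ((lo + hi) / 2)
  else lo
termination_by hi - lo
decreasing_by all_goals omega

-- one iteration of Source B's outer loop on the state (sks, tops)
def diskStepB (st : List (List Int) × List Int) (d : Int) : List (List Int) × List Int :=
  let lo := diskSearchB st.2 d 0 st.2.length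
  if lo = st.1.length then (st.1 ++ [[d]], st.2 ++ [d])
  else (st.1.set lo ((st.1.getD lo []) ++ [d]), st.2.set lo d)

def disk_stack_alt (disk_list : List Int) : List (List Int) :=
  (disk_list.foldl diskStepB ([], [])).1

-- ===== PRECONDITION & SPEC =====
def Spec_disk_stack (disk_list : List Int) (out : List (List Int)) : Prop := out = disk_stack_alt disk_list
instance (disk_list : List Int) (out : List (List Int)) : Decidable (Spec_disk_stack disk_list out) := by unfold Spec_disk_stack; infer_instance

-- ===== CLAIM (what is proved, stated in full; the proofs are below) =====
def Claim_equal_disk_stack : Prop := ∀ (disk_list : List Int), Dom_disk_stack disk_list → Spec_disk_stack disk_list (disk_stack disk_list)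

-- ===== LEMMAS AND PROOFS =====

theorem disk_getD_set (l : List Int) (i j : Nat) (a : Int) :
    (l.set i a).getD j 0 = if i = j ∧ j < l.length then a else l.getD j 0 := by
  simp [List.getD_eq_getElem?_getD, List.getElem?_set]
  split_ifs <;> simp_all

theorem disk_getD_append_left (l : List Int) (i : Nat) (a : Int) (h : i < l.length) :
    (l ++ [a]).getD i 0 = l.getD i 0 := by
  simp [List.getD_eq_getElem?_getD, List.getElem?_append_left h]

theorem disk_getD_append_last (l : List Int) (a : Int) : (l ++ [a]).getD l.length 0 = a := by
  simp [List.getD_eq_getElem?_getD]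

theorem diskTopA_append (s : List Int) (d : Int) : diskTopA (s ++ [d]) = d := by
  simp [diskTopA, pysem]

-- binary search on a non-decreasing list finds the leftmost index whose element exceeds d
theorem diskSearchB_eq (tops : List Int) (d : Int)
    (hm : ∀ i j : Nat, i ≤ j → j < tops.length → tops.getD i 0 ≤ tops.getD j 0) :
    ∀ (n lo hi : Nat), hi - lo ≤ n → hi ≤ tops.length →
      lo ≤ tops.findIdx (fun t => d < t) → tops.findIdx (fun t => d < t) ≤ hi →
      diskSearchB tops d lo hi = tops.findIdx (fun t => d < t) := by
  intro n
  induction n with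
  | zero =>
    intro lo hi h0 _ hlo hhi
    unfold diskSearchB
    rw [dif_neg (by omega)]
    omega
  | succ n ih =>
    intro lo hi hn hlen hlo hhi
    unfold diskSearchB
    by_cases h : lo < hi
    · rw [dif_pos h]
      have hmlo : lo ≤ (lo + hi) / 2 := by omega
      have hmhi : (lo + hi) / 2 < hi := by omega
      by_cases hc : tops.getD ((lo + hi) / 2) 0 ≤ d
      · rw [if_pos hc]
        have hFm : (lo + hi) / 2 < tops.findIdx (fun t => d < t) := by
          by_contra hcon
          push Not at hcon
          have hFlen : tops.findIdx (fun t => d < t) < tops.length := by omega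
          have hp : d < tops[tops.findIdx (fun t => d < t)] := by
            have := List.findIdx_getElem (p := fun t => decide (d < t)) (w := hFlen)
            simpa using this
          have hle : tops.getD (tops.findIdx (fun t => d < t)) 0 ≤ tops.getD ((lo + hi) / 2) 0 :=
            hm _ _ hcon (by omega)
          rw [List.getD_eq_getElem _ _ hFlen] at hle
          omega
        exact ih ((lo + hi) / 2 + 1) hi (by omega) hlen (by omega) hhi
      · rw [if_neg hc]
        have hmF : tops.findIdx (fun t => d < t) ≤ (lo + hi) / 2 := by
          by_contra hcon
          push Not at hcon
          have hmlen : (lo + hi) / 2 < tops.length := by omega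
          have := List.not_of_lt_findIdx (p := fun t => decide (d < t)) (xs := tops)
            (i := (lo + hi) / 2) hcon
          simp only [decide_eq_false_iff_not, not_lt] at this
          rw [List.getD_eq_getElem _ _ hmlen] at hc
          exact hc this
        exact ih lo ((lo + hi) / 2) (by omega) (by omega) hlo hmF
    · rw [dif_neg h]
      omega

-- A's inner loop as a findIdx/set formulation
theorem diskPlaceA_eq (d : Int) : ∀ (sks : List (List Int)),
    diskPlaceA d sks =
      (if sks.findIdx (fun s => d < diskTopA s) = sks.length then sks ++ [[d]]
       else sks.set (sks.findIdx (fun s => d < diskTopA s))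
          ((sks.getD (sks.findIdx (fun s => d < diskTopA s)) []) ++ [d])) := by
  intro sks
  induction sks with
  | nil => simp [diskPlaceA]
  | cons s rest ih =>
    by_cases h : d < diskTopA s
    · simp [diskPlaceA, List.findIdx_cons, h]
    · simp only [diskPlaceA, if_neg h, List.findIdx_cons,
        show (decide (d < diskTopA s)) = false by simpa using h, cond_false, List.length_cons]
      rw [ih]
      by_cases he : rest.findIdx (fun s => d < diskTopA s) = rest.length
      · rw [if_pos he, if_pos (by omega)]
        simp
      · rw [if_neg he, if_neg (by omega)]
        simp

def DiskInv (st : List (List Int) × List Int) : Prop :=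
  st.2 = st.1.map diskTopA ∧
  ∀ i j : Nat, i ≤ j → j < st.2.length → st.2.getD i 0 ≤ st.2.getD j 0

theorem disk_step_main (st : List (List Int) × List Int) (h : DiskInv st) (d : Int) :
    diskPlaceA d st.1 = (diskStepB st d).1 ∧ DiskInv (diskStepB st d) := by
  obtain ⟨htop, hm⟩ := h
  set sks := st.1 with hstacks
  set F := sks.findIdx (fun s => d < diskTopA s) with hF
  have hFt : st.2.findIdx (fun t => d < t) = F := by
    rw [htop, List.findIdx_map]
    rfl
  have hlen2 : st.2.length = sks.length := by rw [htop]; simp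
  have hFle : F ≤ sks.length := by
    rw [← hFt, ← hlen2]; exact List.findIdx_le_length
  have hsearch : diskSearchB st.2 d 0 st.2.length = F := by
    rw [← hFt]
    exact diskSearchB_eq st.2 d hm st.2.length 0 st.2.length (by omega) le_rfl (by omega)
      (by rw [hFt]; omega)
  -- elements strictly below F are ≤ d
  have hbelow : ∀ i : Nat, i < F → st.2.getD i 0 ≤ d := by
    intro i hi
    have hilen : i < st.2.length := by omega
    have := List.not_of_lt_findIdx (p := fun t => decide (d < t)) (xs := st.2) (i := i)
      (by rw [hFt]; omega)
    simp only [decide_eq_false_iff_not, not_lt] at this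
    rw [List.getD_eq_getElem _ _ hilen]
    exact this
  unfold diskStepB
  simp only [hsearch, ← hstacks]
  by_cases he : F = sks.length
  · rw [if_pos he]
    refine ⟨?_, ?_, ?_⟩
    · rw [diskPlaceA_eq, ← hF, if_pos he]
    · simp only [htop]
      simp [diskTopA, pysem]
    · intro i j hij hj
      simp only [List.length_append, List.length_singleton] at hj
      by_cases hjl : j < st.2.length
      · rw [disk_getD_append_left _ _ _ hjl, disk_getD_append_left _ _ _ (by omega)]
        exact hm i j hij hjl
      · have hjeq : j = st.2.length := by omega
        subst hjeq
        rw [disk_getD_append_last]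
        by_cases hil : i < st.2.length
        · rw [disk_getD_append_left _ _ _ hil]
          exact hbelow i (by omega)
        · have : i = st.2.length := by omega
          subst this
          rw [disk_getD_append_last]
  · rw [if_neg he]
    have hFlt : F < sks.length := by omega
    have hFlt2 : F < st.2.length := by omega
    have hpF : d < st.2.getD F 0 := by
      have h2 : List.findIdx (fun t => decide (d < t)) st.2 < st.2.length := by rw [hFt]; omega
      have hp0 := List.findIdx_getElem (w := h2)
      simp only [hFt, decide_eq_true_eq] at hp0
      rw [List.getD_eq_getElem _ _ hFlt2]
      exact hp0
    refine ⟨?_, ?_, ?_⟩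
    · rw [diskPlaceA_eq, ← hF, if_neg he]
    · rw [htop, List.map_set, diskTopA_append]
    · intro i j hij hj
      simp only [List.length_set] at hj
      rw [disk_getD_set, disk_getD_set]
      by_cases hiF : F = i
      · subst hiF
        rw [if_pos ⟨rfl, by omega⟩]
        by_cases hjF : F = j
        · rw [if_pos ⟨hjF, hj⟩]
        · rw [if_neg (by tauto)]
          have : F < j := by omega
          calc d ≤ st.2.getD F 0 := le_of_lt hpF
            _ ≤ st.2.getD j 0 := hm F j (by omega) hj
      · rw [if_neg (by tauto)]
        by_cases hjF : F = j
        · rw [if_pos ⟨hjF, hj⟩]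
          subst hjF
          exact hbelow i (by omega)
        · rw [if_neg (by tauto)]
          exact hm i j hij hj

theorem disk_fold_agree : ∀ (l : List Int) (st : List (List Int) × List Int), DiskInv st →
    l.foldl (fun acc d => diskPlaceA d acc) st.1 = (l.foldl diskStepB st).1 := by
  intro l
  induction l with
  | nil => intro st _; rfl
  | cons d rest ih =>
    intro st hst
    obtain ⟨heq, hinv⟩ := disk_step_main st hst d
    simp only [List.foldl_cons, heq]
    exact ih _ hinv

-- ===== VERDICT (by name: the statement is the Claim_ definition above) =====
theorem disk_stack_spec : Claim_equal_disk_stack := by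
  intro l _
  show disk_stack l = disk_stack_alt l
  unfold disk_stack disk_stack_alt
  exact disk_fold_agree l ([], []) ⟨rfl, by intro i j _ hj; simp at hj⟩
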